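-- pv_equiv track=rewrite | github.com/opusaha/python-omr-scraper | omr_analyzer.py | organize_circles_by_grid
-- ===== SOURCE A (Python) =====
-- from typing import List, Tuple, Dict
--
-- def organize_circles_by_grid(circles: List[Tuple[int, int, int]]) -> Dict[int, Dict[int, List[Tuple[int, int, int]]]]:
--     """Organize circles into a grid structure based on their positions"""
--     if not circles:
--         return {}
--
--     # Sort circles by Y coordinate first (rows), then by X coordinate (columns)
--     sorted_circles = sorted(circles, key=lambda c: (c[1], c[0]))
--
--     # Group circles by rows (questions)
--     rows = {}
--     current_row = 0
--     last_y = sorted_circles[0][1]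
--     row_tolerance = 20  # Pixels tolerance for same row
--
--     for circle in sorted_circles:
--         x, y, r = circle
--
--         # Check if this circle is in a new row
--         if abs(y - last_y) > row_tolerance:
--             current_row += 1
--             last_y = y
--
--         if current_row not in rows:
--             rows[current_row] = []
--         rows[current_row].append(circle)
--
--     # Organize each row into columns (options)
--     grid = {}
--     for row_idx, row_circles in rows.items():
--         # Sort circles in this row by X coordinate
--         row_circles.sort(key=lambda c: c[0])
--
--         # Group into columns (every 4 circles should be options for one question)
--         grid[row_idx] = {}
--         for i, circle in enumerate(row_circles):
--             col = i % 4  # Options 0, 1, 2, 3 (will be converted to 1, 2, 3, 4)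
--             if col not in grid[row_idx]:
--                 grid[row_idx][col] = []
--             grid[row_idx][col].append(circle)
--
--     return grid
-- ===== SOURCE B (Python) =====
-- def organize_circles_by_grid(circles):
--     """Organize circles into a grid structure based on their positions"""
--     if not circles:
--         return {}
--
--     sorted_circles = sorted(circles, key=lambda c: (c[1], c[0]))
--
--     # One pass: tag every circle with its row index (same 20px tolerance rule).
--     tagged = []
--     row = 0
--     last_y = sorted_circles[0][1]
--     for c in sorted_circles:
--         if abs(c[1] - last_y) > 20:
--             row += 1
--             last_y = c[1]
--         tagged.append((row, c))
--
--     # Build the grid directly by comprehension: for each row, sort its circles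
--     # by x and pick every 4th element for each column slot.
--     grid = {}
--     for r in range(row + 1):
--         row_sorted = sorted([c for t, c in tagged if t == r], key=lambda c: c[0])
--         grid[r] = {col: [c for i, c in enumerate(row_sorted) if i % 4 == col]
--                    for col in range(min(4, len(row_sorted)))}
--     return grid
-- ===== Notes on version B (the rewrite author's own statement) =====
-- stated objective: alternative
-- what changed: A builds an intermediate rows dict in one pass and then re-walks it sorting each row and appending into per-column dicts; B instead tags each circle with its row index in one flat list and builds the whole grid directly by range/filter comprehensions that select every 4th sorted circle per column.
import Mathlib
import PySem

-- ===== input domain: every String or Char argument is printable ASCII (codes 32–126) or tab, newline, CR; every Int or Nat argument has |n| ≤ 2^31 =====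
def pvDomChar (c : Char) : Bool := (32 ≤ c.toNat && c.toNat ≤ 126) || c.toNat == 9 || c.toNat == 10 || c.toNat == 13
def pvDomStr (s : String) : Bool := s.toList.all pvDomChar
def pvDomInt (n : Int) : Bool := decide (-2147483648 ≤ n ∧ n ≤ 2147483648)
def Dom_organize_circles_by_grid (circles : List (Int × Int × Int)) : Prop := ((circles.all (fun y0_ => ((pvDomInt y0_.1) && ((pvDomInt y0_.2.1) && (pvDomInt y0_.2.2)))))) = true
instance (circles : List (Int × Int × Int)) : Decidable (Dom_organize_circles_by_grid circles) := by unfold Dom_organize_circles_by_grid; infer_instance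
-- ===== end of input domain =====

-- B replaces A's build-rows-dict-then-repass shape by one flat (row, circle) tagging pass
-- followed by direct per-row/per-column comprehensions (objective: alternative decomposition).

-- ===== PORT A =====
-- default for headD: the guard guarantees the sorted list is nonempty, so it is never used
def pvDefaultCircle : Int × Int × Int := (0, 0, 0)

def organize_circles_by_grid (circles : List (Int × Int × Int)) :
    List (Int × List (Int × List (Int × Int × Int))) :=
  if circles = [] then []
  else
    -- sorted(circles, key=lambda c: (c[1], c[0]))
    let sorted_circles := PySem.List.sorted2 circles (fun c => c.2.1) (fun c => c.1) false
    -- for circle in sorted_circles: build rows dict, current_row, last_y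
    let st := sorted_circles.foldl
      (fun (s : PySem.Dict Int (List (Int × Int × Int)) × Int × Int) circle =>
        let cur_ly := if 20 < |circle.2.1 - s.2.2| then (s.2.1 + 1, circle.2.1) else (s.2.1, s.2.2)
        let rows := if s.1.contains cur_ly.1 then s.1 else s.1.insert cur_ly.1 []
        let rows := rows.insert cur_ly.1 (rows.getD cur_ly.1 [] ++ [circle])
        (rows, cur_ly.1, cur_ly.2))
      (PySem.Dict.empty, 0, (sorted_circles.headD pvDefaultCircle).2.1)
    -- for row_idx, row_circles in rows.items(): sort by x, group into columns i % 4
    let grid := st.1.items.foldl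
      (fun (grid : PySem.Dict Int (PySem.Dict Int (List (Int × Int × Int)))) p =>
        let row_sorted := PySem.List.sorted p.2 (fun c => c.1) false
        let inner := (PySem.List.enumerate row_sorted 0).foldl
          (fun (d : PySem.Dict Int (List (Int × Int × Int))) q =>
            let col := PySem.Int.mod q.1 4
            let d := if d.contains col then d else d.insert col []
            d.insert col (d.getD col [] ++ [q.2]))
          PySem.Dict.empty
        grid.insert p.1 inner)
      PySem.Dict.empty
    grid.items.map (fun p => (p.1, p.2.items))

-- ===== PORT B =====
def organize_circles_by_grid_alt (circles : List (Int × Int × Int)) :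
    List (Int × List (Int × List (Int × Int × Int))) :=
  if circles = [] then []
  else
    let sorted_circles := PySem.List.sorted2 circles (fun c => c.2.1) (fun c => c.1) false
    -- one tagging pass: tagged list of (row, circle)
    let st := sorted_circles.foldl
      (fun (s : List (Int × (Int × Int × Int)) × Int × Int) c =>
        let row_ly := if 20 < |c.2.1 - s.2.2| then (s.2.1 + 1, c.2.1) else (s.2.1, s.2.2)
        (s.1 ++ [(row_ly.1, c)], row_ly.1, row_ly.2))
      ([], 0, (sorted_circles.headD pvDefaultCircle).2.1)
    -- grid built by comprehensions over the tagged list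
    (PySem.List.pyRange 0 (st.2.1 + 1) 1).map (fun r =>
      let row_sorted := PySem.List.sorted
        ((st.1.filter (fun t => t.1 == r)).map (fun t => t.2)) (fun c => c.1) false
      (r, (PySem.List.pyRange 0 (min 4 (row_sorted.length : Int)) 1).map (fun col =>
        (col, ((PySem.List.enumerate row_sorted 0).filter
                 (fun q => PySem.Int.mod q.1 4 == col)).map (fun q => q.2)))))

-- ===== PRECONDITION & SPEC =====
def Spec_organize_circles_by_grid (circles : List (Int × Int × Int)) (out : List (Int × List (Int × List (Int × Int × Int)))) : Prop := out = organize_circles_by_grid_alt circles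
instance (circles : List (Int × Int × Int)) (out : List (Int × List (Int × List (Int × Int × Int)))) : Decidable (Spec_organize_circles_by_grid circles out) := by
  unfold Spec_organize_circles_by_grid
  -- instance search for the deeply nested list type exceeds the default search size; assemble it in steps
  have h1 : DecidableEq (List (Int × Int × Int)) := fun x y => by infer_instance
  have h2 : DecidableEq (List (Int × List (Int × Int × Int))) := fun x y =>
    @instDecidableEqList _ (@instDecidableEqProd _ _ _ h1) x y
  exact @instDecidableEqList _ (@instDecidableEqProd _ _ _ h2) out _

-- ===== CLAIM (what is proved, stated in full; the proofs are below) =====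
def Claim_equal_organize_circles_by_grid : Prop := ∀ (circles : List (Int × Int × Int)), Dom_organize_circles_by_grid circles → Spec_organize_circles_by_grid circles (organize_circles_by_grid circles)

-- ===== LEMMAS AND PROOFS =====

def pvGroups (tagged : List (Int × (Int × Int × Int))) (n : Nat) :
    List (Int × List (Int × Int × Int)) :=
  (List.range n).map (fun (r : Nat) => ((r : Int), (tagged.filter (fun t => t.1 == (r : Int))).map (fun t => t.2)))

lemma pvDictEqMk {κ ν : Type} (d : PySem.Dict κ ν) (L : List (κ × ν)) (h : d.items = L) :
    d = PySem.Dict.mk L := by rw [← h]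

lemma pvMkMap_keys_nodup {ν : Type} (n : Nat) (f : Nat → ν) :
    (PySem.Dict.mk ((List.range n).map (fun (i : Nat) => ((i : Int), f i)))).keys.Nodup := by
  have h : (PySem.Dict.mk ((List.range n).map (fun (i : Nat) => ((i : Int), f i)))).keys
      = (List.range n).map (fun (i : Nat) => (i : Int)) := by
    show ((List.range n).map (fun (i : Nat) => ((i : Int), f i))).map Prod.fst = _
    simp [List.map_map, Function.comp]
  rw [h]
  exact List.nodup_range.map (fun a b hab => by exact_mod_cast hab)

lemma pvMkMap_contains {ν : Type} (n : Nat) (f : Nat → ν) (k : Int) :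
    (PySem.Dict.mk ((List.range n).map (fun (i : Nat) => ((i : Int), f i)))).contains k
      = decide (0 ≤ k ∧ k < (n : Int)) := by
  show ((List.range n).map (fun (i : Nat) => ((i : Int), f i))).any (fun p => p.1 == k) = _
  rw [Bool.eq_iff_iff]
  simp only [List.any_map, List.any_eq_true, List.mem_range, Function.comp_apply, beq_iff_eq,
    decide_eq_true_eq]
  constructor
  · rintro ⟨i, hi, rfl⟩; exact ⟨by positivity, by exact_mod_cast hi⟩
  · rintro ⟨h0, h1⟩; exact ⟨k.toNat, by omega, by omega⟩

lemma pvMkMap_getD {ν : Type} (n : Nat) (f : Nat → ν) (r : Nat) (hr : r < n) (v0 : ν) :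
    (PySem.Dict.mk ((List.range n).map (fun (i : Nat) => ((i : Int), f i)))).getD (r : Int) v0 = f r := by
  apply PySem.Dict.getD_of_mem_items
  · show ((r:Int), f r) ∈ (List.range n).map (fun (i : Nat) => ((i : Int), f i))
    exact List.mem_map.mpr ⟨r, List.mem_range.mpr hr, rfl⟩
  · exact pvMkMap_keys_nodup n f

lemma pvGroups_shape (tagged : List (Int × (Int × Int × Int))) (n : Nat) :
    pvGroups tagged n = (List.range n).map (fun (i : Nat) =>
      ((i : Int), (tagged.filter (fun t => t.1 == (i : Int))).map (fun t => t.2))) := rfl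

lemma pvGroups_append_ge (tagged : List (Int × (Int × Int × Int))) (n : Nat) (k : Int)
    (c : Int × Int × Int) (hk : ∀ (i : Nat), i < n → (i : Int) ≠ k) :
    pvGroups (tagged ++ [(k, c)]) n = pvGroups tagged n := by
  rw [pvGroups_shape, pvGroups_shape]
  apply List.map_congr_left
  intro i hi
  simp only [List.mem_range] at hi
  have : ((k, c).1 == (i : Int)) = false := by
    simp only [beq_eq_false_iff_ne]; exact fun h => hk i hi h.symm
  simp [List.filter_append, this]

-- mapping the "replace key k" function over groups with all keys < n ≤ k: identity
lemma pvGroups_map_replace_ge (tagged : List (Int × (Int × Int × Int))) (n : Nat) (k : Int)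
    (v : List (Int × Int × Int)) (hk : ∀ (i : Nat), i < n → (i : Int) ≠ k) :
    (pvGroups tagged n).map (fun p => if p.1 == k then (k, v) else p) = pvGroups tagged n := by
  rw [pvGroups_shape]
  rw [List.map_map]
  apply List.map_congr_left
  intro i hi
  simp only [List.mem_range] at hi
  have : ((i : Int) == k) = false := by
    simp only [beq_eq_false_iff_ne]; exact hk i hi
  simp [Function.comp, this]

-- replacing the last (key row) group by its value extended with c = groups of tagged ++ [(row, c)]
lemma pvGroups_map_replace_last (tagged : List (Int × (Int × Int × Int))) (row : Int)
    (c : Int × Int × Int) :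
    (pvGroups tagged (row.toNat + 1)).map (fun p =>
        if p.1 == row then (row, (tagged.filter (fun t => t.1 == row)).map (fun t => t.2) ++ [c]) else p)
      = pvGroups (tagged ++ [(row, c)]) (row.toNat + 1) := by
  rw [pvGroups_shape, pvGroups_shape, List.map_map]
  apply List.map_congr_left
  intro i hi
  simp only [List.mem_range] at hi
  by_cases he : (i : Int) = row
  · simp only [Function.comp, he, beq_self_eq_true, if_true, List.filter_append]
    simp
  · have hb : ((i : Int) == row) = false := by simp [he]
    have hb2 : (row == (i : Int)) = false := by simp [Ne.symm he]
    simp [Function.comp, hb, List.filter_append, hb2]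

lemma pvGroups_succ (tg : List (Int × (Int × Int × Int))) (n : Nat) :
    pvGroups tg (n + 1) = pvGroups tg n
      ++ [((n : Int), (tg.filter (fun t => t.1 == (n : Int))).map (fun t => t.2))] := by
  rw [pvGroups_shape, List.range_succ, List.map_append]
  rfl

lemma pvGroups_snoc_new (tagged : List (Int × (Int × Int × Int))) (row : Int)
    (c : Int × Int × Int) (h0 : 0 ≤ row) (htag : ∀ t ∈ tagged, t.1 ≤ row) :
    pvGroups (tagged ++ [(row + 1, c)]) (row.toNat + 1 + 1)
      = pvGroups tagged (row.toNat + 1) ++ [(row + 1, [] ++ [c])] := by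
  rw [pvGroups_succ, pvGroups_append_ge tagged (row.toNat + 1) (row + 1) c (by intro i hi; omega)]
  congr 1
  have hcast : ((row.toNat + 1 : Nat) : Int) = row + 1 := by omega
  rw [hcast]
  have hfil : tagged.filter (fun t => t.1 == row + 1) = [] := by
    rw [List.filter_eq_nil_iff]
    intro t ht
    have := htag t ht
    simp only [beq_iff_eq]; omega
  simp [List.filter_append, hfil]

lemma pvStepEq (tagged : List (Int × (Int × Int × Int))) (row ly : Int)
    (c : Int × Int × Int) (h0 : 0 ≤ row) (htag : ∀ t ∈ tagged, t.1 ≤ row) :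
    (fun (s : PySem.Dict Int (List (Int × Int × Int)) × Int × Int) circle =>
        let cur_ly := if 20 < |circle.2.1 - s.2.2| then (s.2.1 + 1, circle.2.1) else (s.2.1, s.2.2)
        let rows := if s.1.contains cur_ly.1 then s.1 else s.1.insert cur_ly.1 []
        let rows := rows.insert cur_ly.1 (rows.getD cur_ly.1 [] ++ [circle])
        (rows, cur_ly.1, cur_ly.2))
      (PySem.Dict.mk (pvGroups tagged (row.toNat + 1)), row, ly) c
    = ((if 20 < |c.2.1 - ly| then
         PySem.Dict.mk (pvGroups (tagged ++ [(row + 1, c)]) ((row + 1).toNat + 1))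
        else
         PySem.Dict.mk (pvGroups (tagged ++ [(row, c)]) (row.toNat + 1))),
       (if 20 < |c.2.1 - ly| then row + 1 else row),
       (if 20 < |c.2.1 - ly| then c.2.1 else ly)) := by
  by_cases hc : 20 < |c.2.1 - ly|
  · -- new row
    simp only [hc, if_true]
    set d := PySem.Dict.mk (pvGroups tagged (row.toNat + 1)) with hd
    have hnotmem : d.contains (row + 1) = false := by
      rw [hd, pvGroups_shape, pvMkMap_contains]
      simp only [decide_eq_false_iff_not]
      intro ⟨_, hlt⟩; omega
    have hins : (d.insert (row + 1) []).items
        = pvGroups tagged (row.toNat + 1) ++ [(row + 1, [])] :=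
      PySem.Dict.items_insert_of_not_contains _ _ hnotmem
    have hmk := pvDictEqMk _ _ hins
    simp only [hnotmem, Bool.false_eq_true, if_false]
    have hget : (d.insert (row + 1) []).getD (row + 1) [] = [] :=
      PySem.Dict.getD_insert_self _ _ _ _
    rw [hget, hmk]
    have hcont2 : (PySem.Dict.mk (pvGroups tagged (row.toNat + 1) ++ [(row + 1, [])])).contains (row + 1) = true := by
      show (pvGroups tagged (row.toNat + 1) ++ [(row + 1, [])]).any (fun p => p.1 == row + 1) = true
      simp [List.any_append]
    have hitems2 := PySem.Dict.items_insert_of_contains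
      (PySem.Dict.mk (pvGroups tagged (row.toNat + 1) ++ [(row + 1, [])]))
      ([] ++ [c]) hcont2
    have hitems2' : ((PySem.Dict.mk (pvGroups tagged (row.toNat + 1) ++ [(row + 1, [])])).insert
        (row + 1) ([] ++ [c])).items
        = (pvGroups tagged (row.toNat + 1) ++ [(row + 1, [])]).map
            (fun (p : Int × List (Int × Int × Int)) => if p.1 == row + 1 then (row + 1, [] ++ [c]) else p) := hitems2
    rw [pvDictEqMk _ _ hitems2']
    refine congrArg (fun d => (d, row + 1, c.2.1)) (congrArg PySem.Dict.mk ?_)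
    have hn : (row + 1).toNat + 1 = row.toNat + 1 + 1 := by omega
    rw [List.map_append,
      pvGroups_map_replace_ge tagged (row.toNat + 1) (row + 1) ([] ++ [c]) (by intro i hi; omega),
      hn, pvGroups_snoc_new tagged row c h0 htag]
    congr 1
    simp

  · -- same row
    simp only [if_neg hc]
    set d := PySem.Dict.mk (pvGroups tagged (row.toNat + 1)) with hd
    have hcont : d.contains row = true := by
      rw [hd, pvGroups_shape, pvMkMap_contains]
      simp only [decide_eq_true_eq]
      constructor
      · exact h0
      · omega
    simp only [hcont, if_true]
    have hcast : ((row.toNat : Nat) : Int) = row := by omega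
    have hgd : d.getD row [] = (tagged.filter (fun t => t.1 == row)).map (fun t => t.2) := by
      rw [hd, pvGroups_shape]
      have hg := pvMkMap_getD (row.toNat + 1)
        (fun i => (tagged.filter (fun t => t.1 == (i : Int))).map (fun t => t.2))
        row.toNat (by omega) []
      rw [hcast] at hg
      exact hg
    rw [hgd]
    have hitems := PySem.Dict.items_insert_of_contains d
      ((tagged.filter (fun t => t.1 == row)).map (fun t => t.2) ++ [c]) hcont
    have hitems' : (d.insert row ((tagged.filter (fun t => t.1 == row)).map (fun t => t.2) ++ [c])).items
        = (pvGroups tagged (row.toNat + 1)).map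
            (fun (p : Int × List (Int × Int × Int)) =>
              if p.1 == row then (row, (tagged.filter (fun t => t.1 == row)).map (fun t => t.2) ++ [c]) else p) := hitems
    rw [pvDictEqMk _ _ hitems']
    refine congrArg (fun d => (d, row, ly)) (congrArg PySem.Dict.mk ?_)
    exact pvGroups_map_replace_last tagged row c

lemma pvTagLoop (l : List (Int × Int × Int)) (tagged : List (Int × (Int × Int × Int)))
    (row ly : Int) (h0 : 0 ≤ row) (htag : ∀ t ∈ tagged, t.1 ≤ row) :
    l.foldl
      (fun (s : PySem.Dict Int (List (Int × Int × Int)) × Int × Int) circle =>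
        let cur_ly := if 20 < |circle.2.1 - s.2.2| then (s.2.1 + 1, circle.2.1) else (s.2.1, s.2.2)
        let rows := if s.1.contains cur_ly.1 then s.1 else s.1.insert cur_ly.1 []
        let rows := rows.insert cur_ly.1 (rows.getD cur_ly.1 [] ++ [circle])
        (rows, cur_ly.1, cur_ly.2))
      (PySem.Dict.mk (pvGroups tagged (row.toNat + 1)), row, ly)
    = ((fun (s : List (Int × (Int × Int × Int)) × Int × Int) =>
        (PySem.Dict.mk (pvGroups s.1 (s.2.1.toNat + 1)), s.2.1, s.2.2))
       (l.foldl
        (fun (s : List (Int × (Int × Int × Int)) × Int × Int) c =>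
          let row_ly := if 20 < |c.2.1 - s.2.2| then (s.2.1 + 1, c.2.1) else (s.2.1, s.2.2)
          (s.1 ++ [(row_ly.1, c)], row_ly.1, row_ly.2)) (tagged, row, ly))) := by
  induction l generalizing tagged row ly with
  | nil => rfl
  | cons c l ih =>
    rw [List.foldl_cons, List.foldl_cons]
    have hstep := pvStepEq tagged row ly c h0 htag
    dsimp only at hstep ⊢
    rw [hstep]
    by_cases hc : 20 < |c.2.1 - ly|
    · simp only [hc, if_true]
      rw [ih (tagged ++ [(row + 1, c)]) (row + 1) c.2.1 (by omega)
        (by intro t ht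
            rcases List.mem_append.mp ht with h | h
            · exact le_trans (htag t h) (by omega)
            · simp only [List.mem_singleton] at h; subst h; simp)]
    · simp only [if_neg hc]
      rw [ih (tagged ++ [(row, c)]) row ly h0
        (by intro t ht
            rcases List.mem_append.mp ht with h | h
            · exact htag t h
            · simp only [List.mem_singleton] at h; subst h; simp)]

lemma pvBInv (l : List (Int × Int × Int)) (tagged : List (Int × (Int × Int × Int)))
    (row ly : Int) (h0 : 0 ≤ row) (htag : ∀ t ∈ tagged, t.1 ≤ row) :
    0 ≤ (l.foldl
      (fun (s : List (Int × (Int × Int × Int)) × Int × Int) c =>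
        let row_ly := if 20 < |c.2.1 - s.2.2| then (s.2.1 + 1, c.2.1) else (s.2.1, s.2.2)
        (s.1 ++ [(row_ly.1, c)], row_ly.1, row_ly.2)) (tagged, row, ly)).2.1
    ∧ ∀ t ∈ (l.foldl
      (fun (s : List (Int × (Int × Int × Int)) × Int × Int) c =>
        let row_ly := if 20 < |c.2.1 - s.2.2| then (s.2.1 + 1, c.2.1) else (s.2.1, s.2.2)
        (s.1 ++ [(row_ly.1, c)], row_ly.1, row_ly.2)) (tagged, row, ly)).1,
      t.1 ≤ (l.foldl
      (fun (s : List (Int × (Int × Int × Int)) × Int × Int) c =>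
        let row_ly := if 20 < |c.2.1 - s.2.2| then (s.2.1 + 1, c.2.1) else (s.2.1, s.2.2)
        (s.1 ++ [(row_ly.1, c)], row_ly.1, row_ly.2)) (tagged, row, ly)).2.1 := by
  induction l generalizing tagged row ly with
  | nil => exact ⟨h0, htag⟩
  | cons c l ih =>
    rw [List.foldl_cons]
    dsimp only
    by_cases hc : 20 < |c.2.1 - ly|
    · simp only [if_pos hc]
      exact ih (tagged ++ [(row + 1, c)]) (row + 1) c.2.1 (by omega)
        (by intro t ht
            rcases List.mem_append.mp ht with h | h
            · exact le_trans (htag t h) (by omega)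
            · simp only [List.mem_singleton] at h; subst h; simp)
    · simp only [if_neg hc]
      exact ih (tagged ++ [(row, c)]) row ly h0
        (by intro t ht
            rcases List.mem_append.mp ht with h | h
            · exact htag t h
            · simp only [List.mem_singleton] at h; subst h; simp)

lemma pvFoldInsertFresh {ν : Type} (L : List (Int × List (Int × Int × Int)))
    (f : Int × List (Int × Int × Int) → ν) (g : PySem.Dict Int ν)
    (h : ∀ p ∈ L, g.contains p.1 = false) (hnd : (L.map Prod.fst).Nodup) :
    (L.foldl (fun g p => g.insert p.1 (f p)) g).items
      = g.items ++ L.map (fun p => (p.1, f p)) := by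
  induction L generalizing g with
  | nil => simp
  | cons p L ih =>
    rw [List.foldl_cons, ih]
    · rw [PySem.Dict.items_insert_of_not_contains _ _ (h p (List.mem_cons_self ..))]
      simp
    · intro q hq
      have hne : q.1 ≠ p.1 := by
        simp only [List.map_cons, List.nodup_cons] at hnd
        intro he
        exact hnd.1 (he ▸ List.mem_map_of_mem hq)
      have hq' := h q (List.mem_cons_of_mem _ hq)
      rw [PySem.Dict.contains_eq_decide_mem_keys] at hq' ⊢
      simp only [decide_eq_false_iff_not] at hq' ⊢
      rw [PySem.Dict.mem_keys_insert]
      rintro (he | he)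
      · exact hne he
      · exact hq' he
    · simp only [List.map_cons, List.nodup_cons] at hnd
      exact hnd.2

def pvColVal (l : List (Int × Int × Int)) (i : Nat) : List (Int × Int × Int) :=
  ((PySem.List.enumerate l 0).filter
     (fun q => PySem.Int.mod q.1 4 == (i : Int))).map (fun q => q.2)

def pvCols (l : List (Int × Int × Int)) : List (Int × List (Int × Int × Int)) :=
  (List.range (min 4 l.length)).map (fun (i : Nat) => ((i : Int), pvColVal l i))

lemma pvModCast (k : Nat) : PySem.Int.mod (k : Int) 4 = ((k % 4 : Nat) : Int) := by
  exact_mod_cast PySem.Int.mod_natCast k 4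

lemma pvColVal_append (l : List (Int × Int × Int)) (c : Int × Int × Int) (i : Nat) :
    pvColVal (l ++ [c]) i = pvColVal l i ++ (if l.length % 4 = i then [c] else []) := by
  unfold pvColVal
  rw [PySem.List.enumerate_append, List.filter_append, List.map_append]
  congr 1
  have h1 : PySem.List.enumerate [c] (0 + (l.length : Int)) = [((l.length : Int), c)] := by
    rw [PySem.List.enumerate_cons, PySem.List.enumerate_nil]
    norm_num
  rw [h1]
  by_cases he : l.length % 4 = i
  · simp only [List.filter_cons, pvModCast, he, beq_self_eq_true, if_pos, List.filter_nil]
    simp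
  · have : (((l.length % 4 : Nat) : Int) == (i : Int)) = false := by
      simp only [beq_eq_false_iff_ne]; exact_mod_cast he
    simp only [List.filter_cons, pvModCast, this, List.filter_nil]
    simp [he]


lemma pvColVal_last_nil (l : List (Int × Int × Int)) (hlen : l.length ≤ 4) :
    pvColVal l l.length = [] := by
  unfold pvColVal
  rw [List.map_eq_nil_iff, List.filter_eq_nil_iff]
  intro q hq
  rcases (PySem.List.mem_enumerate_iff _ _ _).mp hq with ⟨k, hk, rfl⟩
  have : (0 : Int) + (k : Int) = ((k : Nat) : Int) := by omega
  simp only [this, pvModCast, beq_iff_eq]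
  intro he
  have : k % 4 = l.length := by exact_mod_cast he
  omega

lemma pvCols_snoc_new (l : List (Int × Int × Int)) (c : Int × Int × Int)
    (hlen : l.length < 4) :
    pvCols (l ++ [c]) = pvCols l ++ [((l.length : Int), [] ++ [c])] := by
  unfold pvCols
  have hm1 : min 4 (l ++ [c]).length = l.length + 1 := by simp; omega
  have hm2 : min 4 l.length = l.length := by omega
  rw [hm1, hm2, List.range_succ, List.map_append]
  congr 1
  · apply List.map_congr_left
    intro i hi
    simp only [List.mem_range] at hi
    rw [pvColVal_append]
    have : l.length % 4 ≠ i := by omega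
    simp [this]
  · simp only [List.map_cons, List.map_nil]
    rw [pvColVal_append, pvColVal_last_nil l (by omega)]
    simp
    omega

lemma pvCols_map_replace (l : List (Int × Int × Int)) (c : Int × Int × Int)
    (hlen : 4 ≤ l.length) :
    (pvCols l).map (fun p =>
        if p.1 == ((l.length % 4 : Nat) : Int)
        then (((l.length % 4 : Nat) : Int), pvColVal l (l.length % 4) ++ [c]) else p)
      = pvCols (l ++ [c]) := by
  unfold pvCols
  have hm1 : min 4 (l ++ [c]).length = 4 := by simp; omega
  have hm2 : min 4 l.length = 4 := by omega
  rw [hm1, hm2, List.map_map]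
  apply List.map_congr_left
  intro i hi
  simp only [List.mem_range] at hi
  by_cases he : i = l.length % 4
  · have hb : ((i : Int) == ((l.length % 4 : Nat) : Int)) = true := by
      simp only [beq_iff_eq]; exact_mod_cast he
    simp only [Function.comp_apply, hb, if_pos, pvColVal_append]
    subst he
    simp
  · have hb : ((i : Int) == ((l.length % 4 : Nat) : Int)) = false := by
      simp only [beq_eq_false_iff_ne]
      intro hx; exact he (by exact_mod_cast hx)
    simp only [Function.comp_apply, hb, Bool.false_eq_true, if_false, pvColVal_append]
    have : l.length % 4 ≠ i := fun hx => he hx.symm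
    simp [this]

lemma pvGroupsKeysNodup (tg : List (Int × (Int × Int × Int))) (n : Nat) :
    ((pvGroups tg n).map Prod.fst).Nodup := by
  have h : (pvGroups tg n).map Prod.fst = (List.range n).map (fun (i : Nat) => (i : Int)) := by
    rw [pvGroups_shape, List.map_map]; rfl
  rw [h]
  exact List.nodup_range.map (fun a b hab => by exact_mod_cast hab)

lemma pvInnerItems (l : List (Int × Int × Int)) :
    (PySem.List.enumerate l 0).foldl
      (fun (d : PySem.Dict Int (List (Int × Int × Int))) q =>
        (if d.contains (PySem.Int.mod q.1 4) then d else d.insert (PySem.Int.mod q.1 4) []).insert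
          (PySem.Int.mod q.1 4)
          ((if d.contains (PySem.Int.mod q.1 4) then d
            else d.insert (PySem.Int.mod q.1 4) []).getD (PySem.Int.mod q.1 4) [] ++ [q.2]))
      PySem.Dict.empty
    = PySem.Dict.mk (pvCols l) := by
  induction l using List.reverseRecOn with
  | nil => rfl
  | append_singleton l c ih =>
    rw [PySem.List.enumerate_append, List.foldl_append, ih]
    have h1 : PySem.List.enumerate [c] (0 + (l.length : Int)) = [((l.length : Int), c)] := by
      rw [PySem.List.enumerate_cons, PySem.List.enumerate_nil]
      norm_num
    rw [h1, List.foldl_cons, List.foldl_nil]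
    dsimp only
    rw [pvModCast]
    by_cases hlen : l.length < 4
    · -- fresh column key
      have hcol : l.length % 4 = l.length := by omega
      have hcont : (PySem.Dict.mk (pvCols l)).contains ((l.length % 4 : Nat) : Int) = false := by
        rw [pvCols, pvMkMap_contains]
        simp only [decide_eq_false_iff_not]
        intro ⟨_, hlt⟩
        rw [Nat.cast_lt] at hlt
        omega
      simp only [hcont, Bool.false_eq_true, if_false]
      have hins : ((PySem.Dict.mk (pvCols l)).insert ((l.length % 4 : Nat) : Int) []).items
          = pvCols l ++ [(((l.length % 4 : Nat) : Int), [])] :=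
        PySem.Dict.items_insert_of_not_contains _ _ hcont
    
      rw [PySem.Dict.getD_insert_self, pvDictEqMk _ _ hins]
      have hcont2 : (PySem.Dict.mk (pvCols l ++ [(((l.length % 4 : Nat) : Int), [])])).contains
          ((l.length % 4 : Nat) : Int) = true := by
        show (pvCols l ++ [(((l.length % 4 : Nat) : Int), [])]).any
          (fun p => p.1 == ((l.length % 4 : Nat) : Int)) = true
        simp [List.any_append]
      have hitems2 : ((PySem.Dict.mk (pvCols l ++ [(((l.length % 4 : Nat) : Int), [])])).insert
          ((l.length % 4 : Nat) : Int) ([] ++ [c])).items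
          = (pvCols l ++ [(((l.length % 4 : Nat) : Int), [])]).map
              (fun (p : Int × List (Int × Int × Int)) =>
                if p.1 == ((l.length % 4 : Nat) : Int)
                then (((l.length % 4 : Nat) : Int), [] ++ [c]) else p) :=
        PySem.Dict.items_insert_of_contains _ _ hcont2
      rw [pvDictEqMk _ _ hitems2]
      refine congrArg PySem.Dict.mk ?_
      rw [List.map_append]
      have hid : (pvCols l).map
          (fun (p : Int × List (Int × Int × Int)) =>
            if p.1 == ((l.length % 4 : Nat) : Int)
            then (((l.length % 4 : Nat) : Int), [] ++ [c]) else p) = pvCols l := by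
        rw [pvCols, List.map_map]
        apply List.map_congr_left
        intro i hi
        simp only [List.mem_range] at hi
        have hb : ((i : Int) == ((l.length % 4 : Nat) : Int)) = false := by
          simp only [beq_eq_false_iff_ne]
          intro hx
          have : i = l.length % 4 := by exact_mod_cast hx
          omega
        simp only [Function.comp_apply, hb, Bool.false_eq_true, if_false]
      rw [hid, pvCols_snoc_new l c hlen]
      have : ((l.length % 4 : Nat) : Int) = (l.length : Int) := by
        rw [hcol]
      simp [this]
    · -- existing column key
      rw [not_lt] at hlen
      have hcont : (PySem.Dict.mk (pvCols l)).contains ((l.length % 4 : Nat) : Int) = true := by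
        rw [pvCols, pvMkMap_contains]
        simp only [decide_eq_true_eq]
        constructor
        · positivity
        · rw [Nat.cast_lt]; omega
      simp only [hcont, if_true]
      have hgd : (PySem.Dict.mk (pvCols l)).getD ((l.length % 4 : Nat) : Int) []
          = pvColVal l (l.length % 4) := by
        rw [pvCols]
        exact pvMkMap_getD (min 4 l.length) _ (l.length % 4) (by omega) []
      rw [hgd]
      have hitems : ((PySem.Dict.mk (pvCols l)).insert ((l.length % 4 : Nat) : Int)
          (pvColVal l (l.length % 4) ++ [c])).items
          = (pvCols l).map
              (fun (p : Int × List (Int × Int × Int)) =>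
                if p.1 == ((l.length % 4 : Nat) : Int)
                then (((l.length % 4 : Nat) : Int), pvColVal l (l.length % 4) ++ [c]) else p) :=
        PySem.Dict.items_insert_of_contains _ _ hcont
      rw [pvDictEqMk _ _ hitems]
      exact congrArg PySem.Dict.mk (pvCols_map_replace l c hlen)

lemma pvInnerB (l : List (Int × Int × Int)) :
    (PySem.List.pyRange 0 (min 4 (l.length : Int)) 1).map (fun col =>
      (col, ((PySem.List.enumerate l 0).filter
               (fun q => PySem.Int.mod q.1 4 == col)).map (fun q => q.2)))
    = pvCols l := by
  have hmin : (min 4 ((l.length : Nat) : Int)) = ((min 4 l.length : Nat) : Int) := by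
    push_cast; rfl
  rw [hmin, PySem.List.pyRange_zero_natCast, List.map_map]
  rfl

-- ===== VERDICT (by name: the statement is the Claim_ definition above) =====
theorem organize_circles_by_grid_spec : Claim_equal_organize_circles_by_grid := by
  intro circles _
  unfold Spec_organize_circles_by_grid
  show organize_circles_by_grid circles = organize_circles_by_grid_alt circles

  unfold organize_circles_by_grid organize_circles_by_grid_alt
  by_cases hnil : circles = []
  · simp [hnil]
  · simp only [if_neg hnil]
    set sc := PySem.List.sorted2 circles (fun c => c.2.1) (fun c => c.1) false with hsc
    have hscne : sc ≠ [] := by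
      intro h
      have hp := PySem.List.sorted2_perm circles (fun c => c.2.1) (fun c => c.1) false
      rw [← hsc] at hp
      exact hnil (List.Perm.nil_eq (h ▸ hp)).symm
    obtain ⟨c0, rest, hsc0⟩ : ∃ c0 rest, sc = c0 :: rest := by
      cases hx : sc with
      | nil => exact absurd hx hscne
      | cons a b => exact ⟨a, b, rfl⟩
    rw [hsc0]
    rw [List.foldl_cons, List.foldl_cons]
    simp only [List.headD_cons]
    simp only [sub_self, abs_zero, if_neg (show ¬((20:Int) < (0:Int)) by norm_num)]
    have hinit : ((if (PySem.Dict.empty : PySem.Dict Int (List (Int × Int × Int))).contains (0:Int) = true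
          then (PySem.Dict.empty : PySem.Dict Int (List (Int × Int × Int)))
          else PySem.Dict.empty.insert (0:Int) ([] : List (Int × Int × Int))).insert (0:Int)
        ((if (PySem.Dict.empty : PySem.Dict Int (List (Int × Int × Int))).contains (0:Int) = true
          then (PySem.Dict.empty : PySem.Dict Int (List (Int × Int × Int)))
          else PySem.Dict.empty.insert (0:Int) ([] : List (Int × Int × Int))).getD (0:Int) [] ++ [c0]))
        = PySem.Dict.mk (pvGroups [((0:Int), c0)] ((0:Int).toNat + 1)) := by rfl
    rw [hinit]
    rw [pvTagLoop rest [((0:Int), c0)] 0 c0.2.1 (le_refl 0)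
      (by intro t ht; simp only [List.mem_singleton] at ht; subst ht; simp)]
    obtain ⟨h0S, htagS⟩ := pvBInv rest [((0:Int), c0)] 0 c0.2.1 (le_refl 0)
      (by intro t ht; simp only [List.mem_singleton] at ht; subst ht; simp)
    simp only [List.nil_append]
    dsimp only at h0S htagS ⊢
    set S := rest.foldl
      (fun (s : List (Int × (Int × Int × Int)) × Int × Int) c =>
        (s.1 ++ [((if 20 < |c.2.1 - s.2.2| then (s.2.1 + 1, c.2.1) else (s.2.1, s.2.2)).1, c)],
         (if 20 < |c.2.1 - s.2.2| then (s.2.1 + 1, c.2.1) else (s.2.1, s.2.2)).1,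
         (if 20 < |c.2.1 - s.2.2| then (s.2.1 + 1, c.2.1) else (s.2.1, s.2.2)).2))
      ([((0:Int), c0)], 0, c0.2.1) with hS
    rw [pvFoldInsertFresh _ _ _ (fun p _ => rfl) (pvGroupsKeysNodup _ _),
      show (PySem.Dict.empty : PySem.Dict Int (PySem.Dict Int (List (Int × Int × Int)))).items
        = [] from rfl]
    simp only [List.nil_append, List.map_map]
    have hc1 : S.2.1 + 1 = ((S.2.1.toNat + 1 : Nat) : Int) := by omega
    rw [hc1, PySem.List.pyRange_zero_natCast, List.map_map]
    rw [pvGroups_shape, List.map_map]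
    apply List.map_congr_left
    intro i hi
    dsimp only [Function.comp]
    rw [pvInnerItems, pvInnerB]
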